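-- pv_equiv track=rewrite | github.com/PonteIneptique/paramhtrs-extension | app/alignment.py | sub_alignments
-- ===== SOURCE A (Python) =====
-- from typing import Optional, List, Tuple, Literal, Dict, NamedTuple, Union, Callable
-- from collections import deque, Counter
--
-- def normalize(token: str) -> str:
--     return token.lower().replace("v", "u").replace("j", "i")
--
-- def common_hapaxes_normalized(raw: list[str], reg: list[str], max_distance: int) -> list[tuple[str, int, int]]:
--     raw_norm = [normalize(t) for t in raw]
--     reg_norm = [normalize(t) for t in reg]
--
--     results: list[tuple[str, int, int]] = []
--     j = 0
--     last_i, last_j =0, 0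
--     dist = 0
--     for i, tok in enumerate(raw_norm):
--         # suffix-aware counts
--         raw_suffix = raw_norm[i:]
--         reg_suffix = reg_norm[j:]
--
--         raw_counts = Counter(raw_suffix)
--         reg_counts = Counter(reg_suffix)
--
--         if raw_counts[tok] != 1 or reg_counts.get(tok) != 1:
--             continue
--
--         j = reg_norm[last_j:].index(tok) + last_j
--
--         if abs(i - j) <= (max_distance+dist):
--             results.append((tok, i, j))
--             last_j = j
--
--         j += 1
--         dist = abs(j-i)
--
--     return results
--
-- def sub_alignments(orig_toks: List[str], norm_toks: List[str], max_distance=20) -> List: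
--     """ Using local unique tokens, subsplit two sequences.
--
--     :param orig_toks: Tokens in the original string
--     :param norm_toks: Tokens in the normalized string
--     :param max_distance:
--
--     >>> sub_alignments(list("1222234456561222"), list("222222234456561222"))
--     [(['1', '2', '2', '2', '2', '3'], ['2', '2', '2', '2', '2', '2', '2', '3']), (['4', '4', '5', '6', '5', '6', '1'], ['4', '4', '5', '6', '5', '6', '1']), (['2', '2', '2'], ['2', '2', '2'])]
--
--     """
--     orig_toks_simple: list[str] = [el.lower() for el in orig_toks]
--     norm_toks_simple: list[str] = [
--         el.lower().replace("v", "u").replace("j", "i") for el in norm_toks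
--     ]
--
--     # Simplify the task by splitting around common happaxes
--     out = []
--
--     raw_cursor, reg_cursor = 0, 0
--     for tok, raw_id, reg_id in common_hapaxes_normalized(
--             orig_toks_simple, norm_toks_simple, max_distance=max_distance
--     ):
--         raw_subset = orig_toks[raw_cursor:raw_id+1]
--         reg_subset = norm_toks[reg_cursor:reg_id+1]
--
--         out.append((raw_subset, reg_subset))
--
--         # Now we clean up.
--         raw_cursor = raw_id + 1
--         reg_cursor = reg_id + 1
--
--     if raw_cursor < len(orig_toks) and reg_cursor < len(norm_toks):
--         out.append((orig_toks[raw_cursor:], norm_toks[reg_cursor:]))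
--
--     return out
-- ===== SOURCE B (Python) =====
-- def sub_alignments(orig_toks, norm_toks, max_distance=20):
--     """One pass with precomputed per-token data instead of rescanning both
--     suffixes at every position: O(total size) instead of O(n^2)."""
--     def nz(t):
--         return t.lower().replace("v", "u").replace("j", "i")
--
--     raw_norm = [nz(t) for t in orig_toks]
--     reg_norm = [nz(t) for t in norm_toks]
--
--     # positions of every token in reg_norm (each list is increasing)
--     positions = {}
--     for idx, t in enumerate(reg_norm):
--         positions.setdefault(t, []).append(idx)
--     # last occurrence of every token in raw_norm
--     last_raw = {}
--     for idx, t in enumerate(raw_norm):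
--         last_raw[t] = idx
--
--     out = []
--     raw_cursor = reg_cursor = 0
--     j = last_j = dist = 0
--     for i, tok in enumerate(raw_norm):
--         if last_raw[tok] != i:
--             continue  # tok occurs again later in raw_norm: not a suffix hapax
--         ps = positions.get(tok, [])
--         if sum(1 for p in ps if p >= j) != 1:
--             continue  # not a hapax of reg_norm[j:]
--         j = [p for p in ps if p >= last_j][0]
--         if abs(i - j) <= max_distance + dist:
--             out.append((orig_toks[raw_cursor:i + 1], norm_toks[reg_cursor:j + 1]))
--             raw_cursor, reg_cursor = i + 1, j + 1
--             last_j = j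
--         j += 1
--         dist = abs(j - i)
--     if raw_cursor < len(orig_toks) and reg_cursor < len(norm_toks):
--         out.append((orig_toks[raw_cursor:], norm_toks[reg_cursor:]))
--     return out
-- ===== Notes on version B (the rewrite author's own statement) =====
-- stated objective: faster
-- what changed: B replaces A's per-position rebuilding of suffix Counters and repeated slice/.index rescans by a precomputed last-occurrence dict and per-token position lists, consulted in a single pass that also emits the output pairs directly instead of a second cursor loop over the hapax triples.
import Mathlib
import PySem

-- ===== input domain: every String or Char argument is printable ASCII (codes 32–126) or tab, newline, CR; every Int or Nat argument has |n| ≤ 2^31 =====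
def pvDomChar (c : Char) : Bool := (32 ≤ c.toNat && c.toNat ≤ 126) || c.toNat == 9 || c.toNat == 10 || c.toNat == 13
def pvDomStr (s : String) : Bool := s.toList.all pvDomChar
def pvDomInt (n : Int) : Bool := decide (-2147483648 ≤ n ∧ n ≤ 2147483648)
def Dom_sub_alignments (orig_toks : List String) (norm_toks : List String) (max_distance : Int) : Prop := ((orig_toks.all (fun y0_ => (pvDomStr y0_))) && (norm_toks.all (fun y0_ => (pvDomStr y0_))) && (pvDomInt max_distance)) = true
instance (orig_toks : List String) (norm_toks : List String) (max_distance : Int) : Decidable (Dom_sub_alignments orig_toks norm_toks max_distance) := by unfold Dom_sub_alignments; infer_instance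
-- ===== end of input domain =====

-- ===== PORT A =====
-- B precomputes a last-occurrence dict and per-token position lists and emits the
-- output in one pass, instead of A's per-position suffix Counters and second cursor loop.

-- helper `normalize` of A (B's `nz` is the identical expression; shared)
def pvNormalize (s : String) : String :=
  PySem.Str.replace (PySem.Str.replace (PySem.Str.lower s) "v" "u") "j" "i"

-- loop body of A's `common_hapaxes_normalized`
def chnStep (raw_norm reg_norm : List String) (max_distance : Int)
    (st : List (String × Int × Int) × Int × Int × Int) (p : Int × String) :
    List (String × Int × Int) × Int × Int × Int :=
  match st, p with
  | (results, j, last_j, dist), (i, tok) =>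
    let raw_counts := PySem.Dict.counter (PySem.List.slice raw_norm (some i))
    let reg_counts := PySem.Dict.counter (PySem.List.slice reg_norm (some j))
    if raw_counts.getD tok 0 ≠ 1 ∨ reg_counts.get? tok ≠ some 1 then
      (results, j, last_j, dist)
    else
      -- `reg_norm[last_j:].index(tok) + last_j`; `.index` cannot fail here (see proofs)
      let j' : Int := (((PySem.List.index? (PySem.List.slice reg_norm (some last_j)) tok).getD 0 : Nat) : Int) + last_j
      if |i - j'| ≤ max_distance + dist then
        (results ++ [(tok, i, j')], j' + 1, j', |j' + 1 - i|)
      else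
        (results, j' + 1, last_j, |j' + 1 - i|)

def common_hapaxes_normalized (raw reg : List String) (max_distance : Int) :
    List (String × Int × Int) :=
  let raw_norm := raw.map pvNormalize
  let reg_norm := reg.map pvNormalize
  ((PySem.List.enumerate raw_norm).foldl (chnStep raw_norm reg_norm max_distance)
    ([], 0, 0, 0)).1

-- loop body of A's cursor loop over the hapax triples
def subStep (orig_toks norm_toks : List String)
    (st : List (List String × List String) × Int × Int) (trip : String × Int × Int) :
    List (List String × List String) × Int × Int :=
  match st, trip with
  | (out, raw_cursor, reg_cursor), (_, raw_id, reg_id) =>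
    (out ++ [(PySem.List.slice orig_toks (some raw_cursor) (some (raw_id + 1)),
              PySem.List.slice norm_toks (some reg_cursor) (some (reg_id + 1)))],
     raw_id + 1, reg_id + 1)

def sub_alignments (orig_toks : List String) (norm_toks : List String) (max_distance : Int) :
    List (List String × List String) :=
  let orig_toks_simple := orig_toks.map PySem.Str.lower
  let norm_toks_simple := norm_toks.map
    (fun el => PySem.Str.replace (PySem.Str.replace (PySem.Str.lower el) "v" "u") "j" "i")
  match (common_hapaxes_normalized orig_toks_simple norm_toks_simple max_distance).foldl
      (subStep orig_toks norm_toks) ([], 0, 0) with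
  | (out, raw_cursor, reg_cursor) =>
    if raw_cursor < (orig_toks.length : Int) ∧ reg_cursor < (norm_toks.length : Int) then
      out ++ [(PySem.List.slice orig_toks (some raw_cursor),
               PySem.List.slice norm_toks (some reg_cursor))]
    else out

-- ===== PORT B =====

-- loop body of B's single pass
def altStep (orig_toks norm_toks : List String) (max_distance : Int)
    (lastRawD : PySem.Dict String Int) (posD : PySem.Dict String (List Int))
    (st : List (List String × List String) × Int × Int × Int × Int × Int) (p : Int × String) :
    List (List String × List String) × Int × Int × Int × Int × Int :=
  match st, p with
  | (out, raw_cursor, reg_cursor, j, last_j, dist), (i, tok) =>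
    if lastRawD.getD tok 0 ≠ i then (out, raw_cursor, reg_cursor, j, last_j, dist)
    else
      let ps := posD.getD tok []
      if ps.countP (fun q => decide (j ≤ q)) ≠ 1 then (out, raw_cursor, reg_cursor, j, last_j, dist)
      else
        -- `[p for p in ps if p >= last_j][0]`; nonempty here (see proofs)
        let j' : Int := ((ps.filter (fun q => decide (last_j ≤ q))).head?).getD 0
        if |i - j'| ≤ max_distance + dist then
          (out ++ [(PySem.List.slice orig_toks (some raw_cursor) (some (i + 1)),
                    PySem.List.slice norm_toks (some reg_cursor) (some (j' + 1)))],
           i + 1, j' + 1, j' + 1, j', |j' + 1 - i|)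
        else (out, raw_cursor, reg_cursor, j' + 1, last_j, |j' + 1 - i|)

def sub_alignments_alt (orig_toks : List String) (norm_toks : List String) (max_distance : Int) :
    List (List String × List String) :=
  let raw_norm := orig_toks.map pvNormalize
  let reg_norm := norm_toks.map pvNormalize
  let posD := (PySem.List.enumerate reg_norm).foldl
    (fun (d : PySem.Dict String (List Int)) p => d.insert p.2 (d.getD p.2 [] ++ [p.1]))
    PySem.Dict.empty
  let lastRawD := (PySem.List.enumerate raw_norm).foldl
    (fun (d : PySem.Dict String Int) p => d.insert p.2 p.1) PySem.Dict.empty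
  match (PySem.List.enumerate raw_norm).foldl
      (altStep orig_toks norm_toks max_distance lastRawD posD) ([], 0, 0, 0, 0, 0) with
  | (out, raw_cursor, reg_cursor, _, _, _) =>
    if raw_cursor < (orig_toks.length : Int) ∧ reg_cursor < (norm_toks.length : Int) then
      out ++ [(PySem.List.slice orig_toks (some raw_cursor),
               PySem.List.slice norm_toks (some reg_cursor))]
    else out

-- ===== PRECONDITION & SPEC =====
def Spec_sub_alignments (orig_toks : List String) (norm_toks : List String) (max_distance : Int) (out : List (List String × List String)) : Prop := out = sub_alignments_alt orig_toks norm_toks max_distance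
instance (orig_toks : List String) (norm_toks : List String) (max_distance : Int) (out : List (List String × List String)) : Decidable (Spec_sub_alignments orig_toks norm_toks max_distance out) := by unfold Spec_sub_alignments; infer_instance

-- ===== CLAIM (what is proved, stated in full; the proofs are below) =====
def Claim_equal_sub_alignments : Prop := ∀ (orig_toks : List String) (norm_toks : List String) (max_distance : Int), Dom_sub_alignments orig_toks norm_toks max_distance → Spec_sub_alignments orig_toks norm_toks max_distance (sub_alignments orig_toks norm_toks max_distance)

-- ===== LEMMAS AND PROOFS =====

-- ---- character-level facts: pvNormalize is a per-character map, idempotent, lower-absorbing ----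

theorem pv_char_le_iff (a b : Char) : a ≤ b ↔ a.toNat ≤ b.toNat :=
  ⟨fun h => Fin.mk_le_mk.mp h, fun h => Fin.mk_le_mk.mpr h⟩

theorem pv_lowerChar_idem (c : Char) :
    PySem.Chars.lowerChar (PySem.Chars.lowerChar c) = PySem.Chars.lowerChar c := by
  unfold PySem.Chars.lowerChar PySem.Chars.isupper
  by_cases h1 : 'A' ≤ c
  · by_cases h2 : c ≤ 'Z'
    · have hA : (65 : Nat) ≤ c.toNat := pv_char_le_iff _ _ |>.mp h1
      have hZ : c.toNat ≤ 90 := pv_char_le_iff _ _ |>.mp h2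
      have hv : (Char.ofNat (c.toNat + 32)).toNat = c.toNat + 32 := by
        rw [Char.toNat_ofNat, if_pos (Or.inl (by omega))]
      have hle : ¬ (Char.ofNat (c.toNat + 32) ≤ 'Z') := by
        rw [pv_char_le_iff, hv]
        intro h
        rw [show ('Z').toNat = 90 from rfl] at h
        omega
      simp [h1, h2, hle]
    · simp [h2]
  · simp [h1]

-- the single-character map computed by pvNormalize
def pvNormChar (c : Char) : Char :=
  (fun c => if c = 'j' then 'i' else c) ((fun c => if c = 'v' then 'u' else c) (PySem.Chars.lowerChar c))

theorem pv_normChar_lowerChar (c : Char) : pvNormChar (PySem.Chars.lowerChar c) = pvNormChar c := by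
  unfold pvNormChar
  rw [pv_lowerChar_idem]

theorem pv_normChar_idem (c : Char) : pvNormChar (pvNormChar c) = pvNormChar c := by
  have hu : PySem.Chars.lowerChar 'u' = 'u' := by decide
  have hi : PySem.Chars.lowerChar 'i' = 'i' := by decide
  unfold pvNormChar
  simp only
  by_cases hv : PySem.Chars.lowerChar c = 'v'
  · simp [hv, hu]
  · by_cases hj : PySem.Chars.lowerChar c = 'j'
    · simp [hv, hj, hi]
    · simp [hv, hj, pv_lowerChar_idem]

theorem pv_replace_single_go (o n : Char) (l : List Char) : ∀ (fuel : Nat) (acc : List Char),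
    l.length ≤ fuel →
    PySem.Chars.replace.go [o] [n] fuel l acc
      = acc.reverse ++ l.map (fun c => if c = o then n else c) := by
  induction l with
  | nil =>
    intro fuel acc _
    cases fuel <;> simp [PySem.Chars.replace.go]
  | cons c t ih =>
    intro fuel acc hf
    cases fuel with
    | zero => simp at hf
    | succ f =>
      by_cases h : c = o
      · subst h
        simp [PySem.Chars.replace.go, List.isPrefixOf, ih f _ (by simpa using hf)]
      · have hp : [o].isPrefixOf (c :: t) = false := by
          simp [List.isPrefixOf]
          exact fun hh => absurd hh.symm h
        simp [PySem.Chars.replace.go, hp, h, ih f _ (by simpa using hf)]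

theorem pv_replace_single (o n : Char) (s : List Char) :
    PySem.Chars.replace s [o] [n] = s.map (fun c => if c = o then n else c) := by
  simp [PySem.Chars.replace, pv_replace_single_go o n s s.length [] le_rfl]

theorem pv_toList_normalize (s : String) :
    (pvNormalize s).toList = s.toList.map pvNormChar := by
  unfold pvNormalize
  rw [PySem.Str.toList_replace, PySem.Str.toList_replace, PySem.Str.toList_lower]
  rw [show ("v" : String).toList = ['v'] from rfl, show ("u" : String).toList = ['u'] from rfl,
      show ("j" : String).toList = ['j'] from rfl, show ("i" : String).toList = ['i'] from rfl]
  rw [pv_replace_single, pv_replace_single]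
  rw [PySem.Chars.lower]
  simp [List.map_map]
  intro a _
  rfl

theorem pv_normalize_lower (s : String) : pvNormalize (PySem.Str.lower s) = pvNormalize s := by
  apply String.toList_inj.mp
  rw [pv_toList_normalize, pv_toList_normalize, PySem.Str.toList_lower, PySem.Chars.lower,
      List.map_map]
  exact List.map_congr_left fun a _ => pv_normChar_lowerChar a

theorem pv_normChar_map_idem (cs : List Char) :
    (cs.map pvNormChar).map pvNormChar = cs.map pvNormChar := by
  induction cs with
  | nil => rfl
  | cons c cs ih =>
    simp only [List.map_cons]
    rw [pv_normChar_idem c, ih]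

theorem pv_normalize_idem (s : String) : pvNormalize (pvNormalize s) = pvNormalize s := by
  apply String.toList_inj.mp
  rw [pv_toList_normalize (pvNormalize s), pv_toList_normalize s, pv_normChar_map_idem]

-- ---- positions of a token: the proof-side model behind B's two dicts ----

def occFrom (tok : String) : Int → List String → List Int
  | _, [] => []
  | k, x :: xs => (if x = tok then [k] else []) ++ occFrom tok (k + 1) xs

theorem occFrom_lb (tok : String) : ∀ (l : List String) (k : Int), ∀ q ∈ occFrom tok k l, k ≤ q := by
  intro l
  induction l with
  | nil => intro k q hq; simp [occFrom] at hq
  | cons x xs ih =>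
    intro k q hq
    simp only [occFrom, List.mem_append] at hq
    rcases hq with hq | hq
    · split at hq <;> simp at hq; omega
    · have := ih (k + 1) q hq; omega

theorem occFrom_append (tok : String) : ∀ (a b : List String) (k : Int),
    occFrom tok k (a ++ b) = occFrom tok k a ++ occFrom tok (k + a.length) b := by
  intro a
  induction a with
  | nil => intro b k; simp [occFrom]
  | cons x xs ih =>
    intro b k
    simp only [List.cons_append, occFrom, ih]
    simp only [List.length_cons]
    rw [List.append_assoc]
    congr 2
    push_cast
    ring_nf

theorem occFrom_length (tok : String) : ∀ (l : List String) (k : Int),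
    (occFrom tok k l).length = l.count tok := by
  intro l
  induction l with
  | nil => intro k; simp [occFrom]
  | cons x xs ih =>
    intro k
    simp only [occFrom, List.length_append, ih, List.count_cons]
    split <;> rename_i h
    · simp [h, beq_iff_eq]; omega
    · have : (x == tok) = false := by simpa using fun hh => h hh
      simp [this]

theorem occFrom_filter_drop (tok : String) : ∀ (m : Nat) (l : List String) (k : Int),
    (occFrom tok k l).filter (fun q => decide (k + (m : Int) ≤ q))
      = occFrom tok (k + m) (l.drop m) := by
  intro m
  induction m with
  | zero =>
    intro l k
    simp only [Nat.cast_zero, add_zero, List.drop_zero]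
    exact List.filter_eq_self.mpr (fun q hq => by simpa using occFrom_lb tok l k q hq)
  | succ m ih =>
    intro l k
    cases l with
    | nil => simp [occFrom]
    | cons x xs =>
      simp only [occFrom, List.filter_append, List.drop_succ_cons]
      have h1 : ((if x = tok then [k] else []).filter (fun q => decide (k + ((m : Int) + 1) ≤ q))) = ([] : List Int) := by
        split <;> simp
      have h2 := ih xs (k + 1)
      have hp : (fun q => decide (k + 1 + (m : Int) ≤ q)) = (fun q => decide (k + (((m : Nat) + 1 : Nat) : Int) ≤ q)) := by
        funext q; rw [decide_eq_decide]; push_cast; omega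
      rw [hp] at h2
      push_cast at h1 h2 ⊢
      rw [h1, h2]
      simp
      congr 1
      ring

theorem occFrom_head (tok : String) : ∀ (l : List String) (k : Int),
    (occFrom tok k l).head? = (List.idxOf? tok l).map (fun n : Nat => k + (n : Int)) := by
  intro l
  induction l with
  | nil => intro k; simp [occFrom]
  | cons x xs ih =>
    intro k
    by_cases h : x = tok
    · simp [occFrom, h, List.idxOf?_cons]
    · have hb : (x == tok) = false := by simpa using h
      simp only [occFrom, h, if_false, List.nil_append, ih (k + 1), List.idxOf?_cons, hb]
      cases hx : List.idxOf? tok xs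
      · simp
      · simp
        push_cast
        ring

theorem occFrom_getLast_iff (tok : String) (l : List String) (m : Nat)
    (hm : l[m]? = some tok) :
    (occFrom tok 0 l).getLast? = some (m : Int) ↔ (l.drop (m + 1)).count tok = 0 := by
  have hlen : m < l.length := by
    by_contra h
    simp [List.getElem?_eq_none (le_of_not_gt h)] at hm
  have hsplit : l = l.take (m + 1) ++ l.drop (m + 1) := (List.take_append_drop _ _).symm
  have hocc : occFrom tok 0 l
      = occFrom tok 0 (l.take (m + 1)) ++ occFrom tok (0 + (l.take (m + 1)).length) (l.drop (m + 1)) := by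
    conv_lhs => rw [hsplit]
    exact occFrom_append tok _ _ 0
  have htlen : (l.take (m + 1)).length = m + 1 := by simp; omega
  have htake : l.take (m + 1) = l.take m ++ [tok] := by
    rw [List.take_succ, hm]
    rfl
  have hlast : (occFrom tok 0 (l.take (m + 1))).getLast? = some (m : Int) := by
    rw [htake, occFrom_append]
    have : occFrom tok (0 + ((l.take m).length : Int)) [tok] = [0 + ((l.take m).length : Int)] := by
      simp [occFrom]
    rw [this, List.getLast?_concat]
    simp [List.length_take]
    omega
  constructor
  · intro h
    by_contra hc
    have hne : occFrom tok (0 + ((l.take (m + 1)).length : Int)) (l.drop (m + 1)) ≠ [] := by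
      intro he
      have := occFrom_length tok (l.drop (m + 1)) (0 + ((l.take (m + 1)).length : Int))
      rw [he] at this
      exact hc this.symm
    rw [hocc, List.getLast?_append_of_ne_nil _ hne] at h
    have hmem : (m : Int) ∈ occFrom tok (0 + ((l.take (m + 1)).length : Int)) (l.drop (m + 1)) := by
      exact List.mem_of_getLast? h
    have := occFrom_lb tok (l.drop (m + 1)) (0 + ((l.take (m + 1)).length : Int)) _ hmem
    rw [htlen] at this
    push_cast at this
    omega
  · intro h
    have hnil : occFrom tok (0 + ((l.take (m + 1)).length : Int)) (l.drop (m + 1)) = [] := by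
      have := occFrom_length tok (l.drop (m + 1)) (0 + ((l.take (m + 1)).length : Int))
      rw [h] at this
      exact List.length_eq_zero_iff.mp this
    rw [hocc, hnil, List.append_nil, hlast]

theorem pv_lastfold (tok : String) : ∀ (l : List String) (k : Int) (d : PySem.Dict String Int),
    ((PySem.List.enumerate l k).foldl (fun d p => d.insert p.2 p.1) d).get? tok
      = ((occFrom tok k l).getLast?).or (d.get? tok) := by
  intro l
  induction l with
  | nil => intro k d; simp [PySem.List.enumerate, occFrom]
  | cons x xs ih =>
    intro k d
    rw [PySem.List.enumerate_cons]
    simp only [List.foldl_cons]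
    rw [ih (k + 1) (d.insert x k)]
    simp only [occFrom, List.getLast?_append]
    rw [Option.or_assoc]
    congr 1
    rw [PySem.Dict.get?_insert]
    split <;> rename_i h
    · simp [h]
    · have : tok ≠ x := h
      split <;> rename_i h2
      · exact absurd h2.symm this
      · simp

theorem pv_posfold (tok : String) : ∀ (l : List String) (k : Int) (d : PySem.Dict String (List Int)),
    ((PySem.List.enumerate l k).foldl
        (fun (d : PySem.Dict String (List Int)) p => d.insert p.2 (d.getD p.2 [] ++ [p.1])) d).getD tok []
      = d.getD tok [] ++ occFrom tok k l := by
  intro l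
  induction l with
  | nil => intro k d; simp [PySem.List.enumerate, occFrom]
  | cons x xs ih =>
    intro k d
    rw [PySem.List.enumerate_cons]
    simp only [List.foldl_cons]
    rw [ih (k + 1)]
    rw [PySem.Dict.getD_insert]
    simp only [occFrom]
    split <;> rename_i h
    · subst h
      simp
    · have : ¬ (x = tok) := fun hh => h hh.symm
      simp [this]

theorem pv_counter_get_one (xs : List String) (tok : String) :
    (PySem.Dict.counter xs).get? tok = some 1 ↔ xs.count tok = 1 := by
  have hD := PySem.Dict.getD_counter xs tok
  rw [PySem.Dict.getD] at hD
  cases hx : (PySem.Dict.counter xs).get? tok with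
  | none =>
    rw [hx] at hD
    simp at hD
    constructor
    · intro h; simp at h
    · intro h; rw [h] at hD; simp at hD
  | some c =>
    rw [hx] at hD
    simp at hD
    subst hD
    constructor
    · intro h
      have : ((xs.count tok : Int)) = 1 := by
        simpa using h
      exact_mod_cast this
    · intro h
      rw [h]
      rfl

theorem pv_enum_spec {α : Type} : ∀ (l : List α) (k : Int) (p : Int × α), p ∈ PySem.List.enumerate l k →
    ∃ m : Nat, p.1 = k + (m : Int) ∧ l[m]? = some p.2 := by
  intro l
  induction l with
  | nil => intro k p hp; simp [PySem.List.enumerate] at hp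
  | cons x xs ih =>
    intro k p hp
    rw [PySem.List.enumerate_cons] at hp
    rcases List.mem_cons.mp hp with h | h
    · exact ⟨0, by simp [h]⟩
    · obtain ⟨m, hm1, hm2⟩ := ih (k + 1) p h
      exact ⟨m + 1, by constructor; · rw [hm1]; push_cast; ring
                       · simpa using hm2⟩

theorem pv_pred_rw (j : Int) (hj : 0 ≤ j) :
    (fun q => decide (j ≤ q)) = (fun q => decide ((0 : Int) + (j.toNat : Int) ≤ q)) := by
  funext q
  rw [decide_eq_decide]
  omega

theorem pv_cond_raw (raw_norm : List String) (lastRawD : PySem.Dict String Int)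
    (hLR : ∀ t, lastRawD.get? t = (occFrom t 0 raw_norm).getLast?)
    (m : Nat) (tok : String) (hm : raw_norm[m]? = some tok) :
    (PySem.Dict.counter (PySem.List.slice raw_norm (some (m : Int)))).getD tok 0 = 1
      ↔ lastRawD.getD tok 0 = (m : Int) := by
  have hmlt : m < raw_norm.length := by
    by_contra h
    simp [List.getElem?_eq_none (le_of_not_gt h)] at hm
  have hsl : PySem.List.slice raw_norm (some (m : Int)) = raw_norm.drop m := by
    rw [PySem.List.slice_from raw_norm (by positivity)]
    simp
  have hdrop : raw_norm.drop m = tok :: raw_norm.drop (m + 1) := by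
    rw [List.drop_eq_getElem_cons hmlt]
    congr 1
    have := List.getElem?_eq_getElem hmlt
    rw [this] at hm
    exact (Option.some_inj.mp hm)
  have hmem : tok ∈ raw_norm := by
    exact List.mem_of_getElem? hm
  have hocc_ne : occFrom tok 0 raw_norm ≠ [] := by
    intro h
    have hlen := occFrom_length tok raw_norm 0
    rw [h] at hlen
    simp at hlen
    have hcp : 0 < raw_norm.count tok := List.count_pos_iff.mpr hmem
    omega
  obtain ⟨q, hq⟩ : ∃ q, (occFrom tok 0 raw_norm).getLast? = some q := by
    cases hg : (occFrom tok 0 raw_norm).getLast? with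
    | none => exact absurd (List.getLast?_eq_none_iff.mp hg) hocc_ne
    | some q => exact ⟨q, rfl⟩
  have hgetD : lastRawD.getD tok 0 = q := by
    rw [PySem.Dict.getD, hLR, hq]
    rfl
  rw [hsl, PySem.Dict.getD_counter, hdrop, hgetD]
  rw [List.count_cons_self]
  constructor
  · intro h
    have h' : (raw_norm.drop (m + 1)).count tok + 1 = 1 := by exact_mod_cast h
    have hc : (raw_norm.drop (m + 1)).count tok = 0 := by omega
    have hsome := (occFrom_getLast_iff tok raw_norm m hm).mpr hc
    rw [hq] at hsome
    exact Option.some_inj.mp hsome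
  · intro h
    subst h
    have := (occFrom_getLast_iff tok raw_norm m hm).mp hq
    rw [this]
    rfl

theorem pv_cond_reg (reg_norm : List String) (posD : PySem.Dict String (List Int))
    (hPS : ∀ t, posD.getD t [] = occFrom t 0 reg_norm)
    (j : Int) (hj : 0 ≤ j) (tok : String) :
    ((PySem.Dict.counter (PySem.List.slice reg_norm (some j))).get? tok = some 1)
      ↔ ((posD.getD tok []).countP (fun q => decide (j ≤ q)) = 1) := by
  rw [PySem.List.slice_from reg_norm hj, pv_counter_get_one]
  rw [hPS, List.countP_eq_length_filter, pv_pred_rw j hj, occFrom_filter_drop]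
  rw [occFrom_length]

theorem pv_cond_idx (reg_norm : List String) (posD : PySem.Dict String (List Int))
    (hPS : ∀ t, posD.getD t [] = occFrom t 0 reg_norm)
    (j last_j : Int) (h0 : 0 ≤ last_j) (hlj : last_j ≤ j) (tok : String)
    (hcnt : (reg_norm.drop j.toNat).count tok = 1) :
    ((((PySem.List.index? (PySem.List.slice reg_norm (some last_j)) tok).getD 0 : Nat) : Int) + last_j
        = (((posD.getD tok []).filter (fun q => decide (last_j ≤ q))).head?).getD 0)
    ∧ last_j ≤ (((posD.getD tok []).filter (fun q => decide (last_j ≤ q))).head?).getD 0 := by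
  have hmem : tok ∈ reg_norm.drop j.toNat := List.count_pos_iff.mp (by omega)
  have hmem2 : tok ∈ reg_norm.drop last_j.toNat := by
    have : reg_norm.drop j.toNat = (reg_norm.drop last_j.toNat).drop (j.toNat - last_j.toNat) := by
      rw [List.drop_drop]
      congr 1
      omega
    rw [this] at hmem
    exact List.mem_of_mem_drop hmem
  obtain ⟨n, hn⟩ : ∃ n, List.idxOf? tok (reg_norm.drop last_j.toNat) = some n := by
    cases hx : List.idxOf? tok (reg_norm.drop last_j.toNat) with
    | none =>
      exfalso
      have := List.isSome_idxOf?.mpr hmem2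
      rw [hx] at this
      simp at this
    | some n => exact ⟨n, rfl⟩
  have hfil : (posD.getD tok []).filter (fun q => decide (last_j ≤ q))
      = occFrom tok (0 + (last_j.toNat : Int)) (reg_norm.drop last_j.toNat) := by
    rw [hPS, pv_pred_rw last_j h0, occFrom_filter_drop]
  have hhead : (((posD.getD tok []).filter (fun q => decide (last_j ≤ q))).head?).getD 0
      = last_j + (n : Int) := by
    rw [hfil, occFrom_head, hn]
    simp
    omega
  constructor
  · rw [hhead, PySem.List.slice_from reg_norm h0]
    rw [PySem.List.index?, hn]
    simp
    ring
  · rw [hhead]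
    omega

theorem pv_main_fold (raw_norm reg_norm orig_toks norm_toks : List String) (md : Int)
    (lastRawD : PySem.Dict String Int) (posD : PySem.Dict String (List Int))
    (hLR : ∀ t, lastRawD.get? t = (occFrom t 0 raw_norm).getLast?)
    (hPS : ∀ t, posD.getD t [] = occFrom t 0 reg_norm) :
    ∀ (E : List (Int × String)),
      (∀ p ∈ E, ∃ m : Nat, p.1 = (m : Int) ∧ raw_norm[m]? = some p.2) →
      ∀ (results : List (String × Int × Int)) (j last_j dist : Int)
        (out : List (List String × List String)) (rc gc : Int),
      0 ≤ last_j → last_j ≤ j →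
      (out, rc, gc) = results.foldl (subStep orig_toks norm_toks) ([], 0, 0) →
      E.foldl (altStep orig_toks norm_toks md lastRawD posD) (out, rc, gc, j, last_j, dist)
        = (((E.foldl (chnStep raw_norm reg_norm md) (results, j, last_j, dist)).1.foldl
              (subStep orig_toks norm_toks) ([], 0, 0)).1,
           ((E.foldl (chnStep raw_norm reg_norm md) (results, j, last_j, dist)).1.foldl
              (subStep orig_toks norm_toks) ([], 0, 0)).2.1,
           ((E.foldl (chnStep raw_norm reg_norm md) (results, j, last_j, dist)).1.foldl
              (subStep orig_toks norm_toks) ([], 0, 0)).2.2,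
           (E.foldl (chnStep raw_norm reg_norm md) (results, j, last_j, dist)).2.1,
           (E.foldl (chnStep raw_norm reg_norm md) (results, j, last_j, dist)).2.2.1,
           (E.foldl (chnStep raw_norm reg_norm md) (results, j, last_j, dist)).2.2.2) := by
  intro E
  induction E with
  | nil =>
    intro hE results j last_j dist out rc gc h0 hlj hrep
    simp only [List.foldl_nil, ← hrep]
  | cons p E ih =>
    intro hE results j last_j dist out rc gc h0 hlj hrep
    obtain ⟨m, hm1, hm2⟩ := hE p (List.mem_cons_self)
    obtain ⟨i, tok⟩ := p
    simp only at hm1 hm2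
    subst hm1
    have hE' : ∀ q ∈ E, ∃ m : Nat, q.1 = (m : Int) ∧ raw_norm[m]? = some q.2 :=
      fun q hq => hE q (List.mem_cons_of_mem _ hq)
    simp only [List.foldl_cons]
    by_cases hA1 : (PySem.Dict.counter (PySem.List.slice raw_norm (some ((m : Nat) : Int)))).getD tok 0 = 1
    · by_cases hA2 : (PySem.Dict.counter (PySem.List.slice reg_norm (some j))).get? tok = some 1
      · -- both hapax conditions hold
        have hB1 : lastRawD.getD tok 0 = (m : Int) :=
          (pv_cond_raw raw_norm lastRawD hLR m tok hm2).mp hA1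
        have hB2 : (posD.getD tok []).countP (fun q => decide (j ≤ q)) = 1 :=
          (pv_cond_reg reg_norm posD hPS j (le_trans h0 hlj) tok).mp hA2
        have hcnt : (reg_norm.drop j.toNat).count tok = 1 := by
          rw [← pv_counter_get_one, ← PySem.List.slice_from reg_norm (le_trans h0 hlj)]
          exact hA2
        obtain ⟨hjeq, hjge⟩ := pv_cond_idx reg_norm posD hPS j last_j h0 hlj tok hcnt
        by_cases hdist :
            |(m : Int) - ((((PySem.List.index? (PySem.List.slice reg_norm (some last_j)) tok).getD 0 : Nat) : Int) + last_j)| ≤ md + dist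
        · -- appended
          have hstepA : chnStep raw_norm reg_norm md (results, j, last_j, dist) ((m : Int), tok)
              = (results ++ [(tok, (m : Int), (((PySem.List.index? (PySem.List.slice reg_norm (some last_j)) tok).getD 0 : Nat) : Int) + last_j)],
                 ((((PySem.List.index? (PySem.List.slice reg_norm (some last_j)) tok).getD 0 : Nat) : Int) + last_j) + 1,
                 (((PySem.List.index? (PySem.List.slice reg_norm (some last_j)) tok).getD 0 : Nat) : Int) + last_j,
                 |((((PySem.List.index? (PySem.List.slice reg_norm (some last_j)) tok).getD 0 : Nat) : Int) + last_j) + 1 - (m : Int)|) := by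
            simp only [chnStep]
            rw [if_neg (fun h => h.elim (fun h1 => h1 hA1) (fun h2 => h2 hA2)), if_pos hdist]
          have hdistB :
              |(m : Int) - (((posD.getD tok []).filter (fun q => decide (last_j ≤ q))).head?).getD 0| ≤ md + dist := by
            rw [← hjeq]; exact hdist
          have hstepB : altStep orig_toks norm_toks md lastRawD posD (out, rc, gc, j, last_j, dist) ((m : Int), tok)
              = (out ++ [(PySem.List.slice orig_toks (some rc) (some ((m : Int) + 1)),
                          PySem.List.slice norm_toks (some gc) (some ((((posD.getD tok []).filter (fun q => decide (last_j ≤ q))).head?).getD 0 + 1)))],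
                 (m : Int) + 1,
                 (((posD.getD tok []).filter (fun q => decide (last_j ≤ q))).head?).getD 0 + 1,
                 (((posD.getD tok []).filter (fun q => decide (last_j ≤ q))).head?).getD 0 + 1,
                 (((posD.getD tok []).filter (fun q => decide (last_j ≤ q))).head?).getD 0,
                 |(((posD.getD tok []).filter (fun q => decide (last_j ≤ q))).head?).getD 0 + 1 - (m : Int)|) := by
            simp only [altStep]
            rw [if_neg (by simp [hB1]), if_neg (by simp [hB2]), if_pos hdistB]
          rw [hstepA, hstepB, ← hjeq]
          exact ih hE'
            (results ++ [(tok, (m : Int), (((PySem.List.index? (PySem.List.slice reg_norm (some last_j)) tok).getD 0 : Nat) : Int) + last_j)])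
            _ _ _ _ _ _
            (le_trans h0 (hjeq ▸ hjge))
            (by omega)
            (by rw [List.foldl_append, hrep.symm]
                simp only [List.foldl_cons, List.foldl_nil, subStep])
        · -- not appended
          have hstepA : chnStep raw_norm reg_norm md (results, j, last_j, dist) ((m : Int), tok)
              = (results,
                 ((((PySem.List.index? (PySem.List.slice reg_norm (some last_j)) tok).getD 0 : Nat) : Int) + last_j) + 1,
                 last_j,
                 |((((PySem.List.index? (PySem.List.slice reg_norm (some last_j)) tok).getD 0 : Nat) : Int) + last_j) + 1 - (m : Int)|) := by
            simp only [chnStep]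
            rw [if_neg (fun h => h.elim (fun h1 => h1 hA1) (fun h2 => h2 hA2)), if_neg hdist]
          have hdistB :
              ¬ |(m : Int) - (((posD.getD tok []).filter (fun q => decide (last_j ≤ q))).head?).getD 0| ≤ md + dist := by
            rw [← hjeq]; exact hdist
          have hstepB : altStep orig_toks norm_toks md lastRawD posD (out, rc, gc, j, last_j, dist) ((m : Int), tok)
              = (out, rc, gc,
                 (((posD.getD tok []).filter (fun q => decide (last_j ≤ q))).head?).getD 0 + 1,
                 last_j,
                 |(((posD.getD tok []).filter (fun q => decide (last_j ≤ q))).head?).getD 0 + 1 - (m : Int)|) := by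
            simp only [altStep]
            rw [if_neg (by simp [hB1]), if_neg (by simp [hB2]), if_neg hdistB]
          rw [hstepA, hstepB, ← hjeq]
          exact ih hE' results _ _ _ _ _ _ h0 (by omega) hrep
      · -- reg condition fails: both skip
        have hB2 : ¬ (posD.getD tok []).countP (fun q => decide (j ≤ q)) = 1 :=
          fun h => hA2 ((pv_cond_reg reg_norm posD hPS j (le_trans h0 hlj) tok).mpr h)
        have hstepA : chnStep raw_norm reg_norm md (results, j, last_j, dist) ((m : Int), tok)
            = (results, j, last_j, dist) := by
          simp only [chnStep]
          rw [if_pos (Or.inr hA2)]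
        have hstepB : altStep orig_toks norm_toks md lastRawD posD (out, rc, gc, j, last_j, dist) ((m : Int), tok)
            = (out, rc, gc, j, last_j, dist) := by
          simp only [altStep]
          by_cases hB1 : lastRawD.getD tok 0 = (m : Int)
          · rw [if_neg (by simp [hB1]), if_pos hB2]
          · rw [if_pos hB1]
        rw [hstepA, hstepB]
        exact ih hE' results _ _ _ _ _ _ h0 hlj hrep
    · -- raw condition fails: both skip
      have hB1 : lastRawD.getD tok 0 ≠ (m : Int) :=
        fun h => hA1 ((pv_cond_raw raw_norm lastRawD hLR m tok hm2).mpr h)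
      have hstepA : chnStep raw_norm reg_norm md (results, j, last_j, dist) ((m : Int), tok)
          = (results, j, last_j, dist) := by
        simp only [chnStep]
        rw [if_pos (Or.inl hA1)]
      have hstepB : altStep orig_toks norm_toks md lastRawD posD (out, rc, gc, j, last_j, dist) ((m : Int), tok)
          = (out, rc, gc, j, last_j, dist) := by
        simp only [altStep]
        rw [if_pos hB1]
      rw [hstepA, hstepB]
      exact ih hE' results _ _ _ _ _ _ h0 hlj hrep

-- ---- the verdict ----

theorem sub_alignments_spec : Claim_equal_sub_alignments := by
  unfold Claim_equal_sub_alignments Spec_sub_alignments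
  intro orig_toks norm_toks max_distance _
  unfold sub_alignments sub_alignments_alt common_hapaxes_normalized
  simp only
  have hmap1 : (orig_toks.map PySem.Str.lower).map pvNormalize = orig_toks.map pvNormalize := by
    rw [List.map_map]
    exact List.map_congr_left fun a _ => pv_normalize_lower a
  have hmap2 : (norm_toks.map
      (fun el => PySem.Str.replace (PySem.Str.replace (PySem.Str.lower el) "v" "u") "j" "i")).map pvNormalize
      = norm_toks.map pvNormalize := by
    rw [show (fun el => PySem.Str.replace (PySem.Str.replace (PySem.Str.lower el) "v" "u") "j" "i")
          = pvNormalize from rfl]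
    rw [List.map_map]
    exact List.map_congr_left fun a _ => pv_normalize_idem a
  rw [hmap1, hmap2]
  have hLR : ∀ t, ((PySem.List.enumerate (orig_toks.map pvNormalize)).foldl
      (fun (d : PySem.Dict String Int) p => d.insert p.2 p.1) PySem.Dict.empty).get? t
      = (occFrom t 0 (orig_toks.map pvNormalize)).getLast? := by
    intro t
    rw [pv_lastfold]
    rw [PySem.Dict.get?_empty]
    exact Option.or_none
  have hPS : ∀ t, ((PySem.List.enumerate (norm_toks.map pvNormalize)).foldl
      (fun (d : PySem.Dict String (List Int)) p => d.insert p.2 (d.getD p.2 [] ++ [p.1]))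
      PySem.Dict.empty).getD t []
      = occFrom t 0 (norm_toks.map pvNormalize) := by
    intro t
    rw [pv_posfold]
    rw [show (PySem.Dict.empty : PySem.Dict String (List Int)).getD t [] = [] from rfl]
    rfl
  have hE : ∀ p ∈ PySem.List.enumerate (orig_toks.map pvNormalize),
      ∃ m : Nat, p.1 = (m : Int) ∧ (orig_toks.map pvNormalize)[m]? = some p.2 := by
    intro p hp
    obtain ⟨m, hm1, hm2⟩ := pv_enum_spec (orig_toks.map pvNormalize) 0 p hp
    exact ⟨m, by omega, hm2⟩
  have hmain := pv_main_fold (orig_toks.map pvNormalize) (norm_toks.map pvNormalize)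
    orig_toks norm_toks max_distance _ _ hLR hPS
    (PySem.List.enumerate (orig_toks.map pvNormalize)) hE
    [] 0 0 0 [] 0 0 le_rfl le_rfl rfl
  rw [hmain]
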